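-- pv_equiv track=rewrite | github.com/sjkncs/DevClaw-Robot | 3.Software/FeishuBot/feishu_bridge.py | parse_feishu_command
-- ===== SOURCE A (Python) =====
-- from typing import Optional, Dict, Any, Tuple
--
-- COMMAND_MAP: Dict[str, Tuple[str, str, bool]] = {
--     "home":       ("homing",                  "",                  False),
--     "rest":       ("resting",                 "",                  False),
--     "movej":      ("move_j_scurve",           "j1 j2 j3 j4 j5 j6 speed accel", True),
--     "movel":      ("move_l_cart",             "x y z a b c",      True),
--     "teach on":   ("set_teach_mode",          "1",                 False),
--     "teach off":  ("set_teach_mode",          "0",                 False),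
--     "save":       ("save_waypoint",           "",                  False),
--     "record start": ("set_teach_recording",   "1",                 False),
--     "record stop":  ("set_teach_recording",   "0",                 False),
--     "replay":     ("execute_dmp",             "j1 j2 j3 j4 j5 j6", True),
--     "mode":       ("request_mode",            "mode_id",           True),
--     "status":     ("get_robot_state",         "",                  False),
--     "force":      ("get_ext_force",           "",                  False),
--     "estop":      ("__estop__",               "",                  False),
--     "reset":      ("reset_estop",             "",                  False),
--     "stiffness":  ("set_stiffness",           "value",             True),
--     "speed":      ("set_tcp_speed_limit",     "mm_per_s",         True),
--     "impedance":  ("set_impedance_mode",      "mode_id",           True),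
--     "dob on":     ("set_dob_enabled",         "1",                 False),
--     "dob off":    ("set_dob_enabled",         "0",                 False),
--     "ctc on":     ("set_ctc_enabled",         "1",                 False),
--     "ctc off":    ("set_ctc_enabled",         "0",                 False),
--     "friction":   ("set_friction_comp",       "enabled",           True),
--     "collision":  ("set_collision_reaction",  "reaction_id",       True),
--     "calib gravity": ("record_grav_sample",   "",                  False),
--     "calib run":     ("run_grav_calib",       "",                  False),
--     "calib kin":     ("record_kin_sample",    "x y z",             True),
--     "calib kinrun":  ("run_kin_calib",        "",                  False),
--     "workspace":  ("analyze_workspace",       "",                  False),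
--     "singular":   ("is_near_singular",        "",                  False),
--     "telemetry":  ("config_telemetry",        "channels rate",     True),
--     "safety":     ("safety_check",            "",                  False),
--     "dmp record": ("start_dmp_record",        "",                  False),
--     "dmp stop":   ("stop_dmp_record",         "",                  False),
--     "minjerk":    ("move_j_minjerk",          "j1 j2 j3 j4 j5 j6 duration", True),
--     "hybrid":     ("set_hybrid_axis",         "axis force_mode",   True),
--     "forceref":   ("set_force_ref",           "fx fy fz",          True),
--     "help":       ("__help__",                "",                  False),
-- }
--
-- def parse_feishu_command(text: str, prefix: str) -> Optional[Tuple[str, str]]: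
--     """
--     Parse a Feishu message into (sub_command_key, extra_args).
--     Returns None if the message is not a valid command.
--     """
--     text = text.strip()
--     if not text.startswith(prefix):
--         return None
--     body = text[len(prefix):].strip()
--     if not body:
--         return ("help", "")
--
--     # Try multi-word matches first (longest match)
--     for key in sorted(COMMAND_MAP.keys(), key=len, reverse=True):
--         if body == key or body.startswith(key + " "):
--             args = body[len(key):].strip()
--             return (key, args)
--
--     return None  # Unknown command
-- ===== SOURCE B (Python) =====
-- from typing import Optional, Tuple
--
-- # The same command set as COMMAND_MAP, reorganised by word count: one-word keys
-- # as a set, two-word keys as a set of (first-word, second-word) pairs.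
-- ONE_WORD_KEYS = frozenset({
--     "home", "rest", "movej", "movel", "save", "replay", "mode", "status",
--     "force", "estop", "reset", "stiffness", "speed", "impedance", "friction",
--     "collision", "workspace", "singular", "telemetry", "safety", "minjerk",
--     "hybrid", "forceref", "help",
-- })
-- TWO_WORD_KEYS = frozenset({
--     ("teach", "on"), ("teach", "off"), ("record", "start"), ("record", "stop"),
--     ("dob", "on"), ("dob", "off"), ("ctc", "on"), ("ctc", "off"),
--     ("calib", "gravity"), ("calib", "run"), ("calib", "kin"),
--     ("calib", "kinrun"), ("dmp", "record"), ("dmp", "stop"),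
-- })
--
-- def parse_feishu_command(text: str, prefix: str) -> Optional[Tuple[str, str]]:
--     text = text.strip()
--     if not text.startswith(prefix):
--         return None
--     body = text[len(prefix):].strip()
--     if not body:
--         return ("help", "")
--     i = body.find(' ')
--     if i == -1:
--         return (body, "") if body in ONE_WORD_KEYS else None
--     w1 = body[:i]
--     j = body.find(' ', i + 1)
--     w2 = body[i + 1:] if j == -1 else body[i + 1:j]
--     if (w1, w2) in TWO_WORD_KEYS:
--         k = j if j != -1 else len(body)
--         return (w1 + " " + w2, body[k:].strip())
--     if w1 in ONE_WORD_KEYS: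
--         return (w1, body[i:].strip())
--     return None
-- ===== Notes on version B (the rewrite author's own statement) =====
-- stated objective: alternative
-- what changed: Instead of scanning every COMMAND_MAP key sorted by length and prefix-testing each against the body, B reorganises the command set by word count (a set of one-word keys and a set of (first,second) word pairs), slices the body's first two words at its actual space positions and does two direct membership tests (two-word pair first).
import Mathlib
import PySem

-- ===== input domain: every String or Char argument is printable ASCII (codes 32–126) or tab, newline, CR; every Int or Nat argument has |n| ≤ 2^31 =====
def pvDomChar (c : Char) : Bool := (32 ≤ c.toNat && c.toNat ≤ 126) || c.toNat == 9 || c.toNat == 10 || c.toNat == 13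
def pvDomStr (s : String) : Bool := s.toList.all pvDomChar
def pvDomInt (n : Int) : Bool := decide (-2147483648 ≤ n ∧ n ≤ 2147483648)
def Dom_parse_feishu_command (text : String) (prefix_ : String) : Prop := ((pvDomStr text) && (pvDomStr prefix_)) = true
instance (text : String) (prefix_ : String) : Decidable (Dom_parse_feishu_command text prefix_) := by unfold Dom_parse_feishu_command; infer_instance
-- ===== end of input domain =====

-- B replaces A's scan over all command keys sorted by length with the command set
-- reorganised by word count (one-word keys / two-word key pairs) and two direct
-- membership tests on the body's first two words (objective: alternative).

-- ===== PORT A =====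
-- COMMAND_MAP, module-level constant of A
def pvCommandMap : PySem.Dict String (String × String × Bool) :=
  PySem.Dict.ofList [
    ("home",          ("homing",                  "",                  false)),
    ("rest",          ("resting",                 "",                  false)),
    ("movej",         ("move_j_scurve",           "j1 j2 j3 j4 j5 j6 speed accel", true)),
    ("movel",         ("move_l_cart",             "x y z a b c",       true)),
    ("teach on",      ("set_teach_mode",          "1",                 false)),
    ("teach off",     ("set_teach_mode",          "0",                 false)),
    ("save",          ("save_waypoint",           "",                  false)),
    ("record start",  ("set_teach_recording",     "1",                 false)),
    ("record stop",   ("set_teach_recording",     "0",                 false)),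
    ("replay",        ("execute_dmp",             "j1 j2 j3 j4 j5 j6", true)),
    ("mode",          ("request_mode",            "mode_id",           true)),
    ("status",        ("get_robot_state",         "",                  false)),
    ("force",         ("get_ext_force",           "",                  false)),
    ("estop",         ("__estop__",               "",                  false)),
    ("reset",         ("reset_estop",             "",                  false)),
    ("stiffness",     ("set_stiffness",           "value",             true)),
    ("speed",         ("set_tcp_speed_limit",     "mm_per_s",          true)),
    ("impedance",     ("set_impedance_mode",      "mode_id",           true)),
    ("dob on",        ("set_dob_enabled",         "1",                 false)),
    ("dob off",       ("set_dob_enabled",         "0",                 false)),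
    ("ctc on",        ("set_ctc_enabled",         "1",                 false)),
    ("ctc off",       ("set_ctc_enabled",         "0",                 false)),
    ("friction",      ("set_friction_comp",       "enabled",           true)),
    ("collision",     ("set_collision_reaction",  "reaction_id",       true)),
    ("calib gravity", ("record_grav_sample",      "",                  false)),
    ("calib run",     ("run_grav_calib",          "",                  false)),
    ("calib kin",     ("record_kin_sample",       "x y z",             true)),
    ("calib kinrun",  ("run_kin_calib",           "",                  false)),
    ("workspace",     ("analyze_workspace",       "",                  false)),
    ("singular",      ("is_near_singular",        "",                  false)),
    ("telemetry",     ("config_telemetry",        "channels rate",     true)),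
    ("safety",        ("safety_check",            "",                  false)),
    ("dmp record",    ("start_dmp_record",        "",                  false)),
    ("dmp stop",      ("stop_dmp_record",         "",                  false)),
    ("minjerk",       ("move_j_minjerk",          "j1 j2 j3 j4 j5 j6 duration", true)),
    ("hybrid",        ("set_hybrid_axis",         "axis force_mode",   true)),
    ("forceref",      ("set_force_ref",           "fx fy fz",          true)),
    ("help",          ("__help__",                "",                  false))]

-- 'body == key or body.startswith(key + " ")'
def pvMatch (k : String) (body : String) : Bool :=
  body == k || PySem.Str.startswith body (k ++ " ")

-- A's 'for key in sorted(...)' loop: first key that matches returns (key, args)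
def pvLoopA : List String → String → Option (String × String)
  | [], _ => none
  | k :: rest, body =>
    if pvMatch k body then
      some (k, PySem.Str.strip (PySem.Str.slice body (some (PySem.Str.len k)) none))
    else pvLoopA rest body

def parse_feishu_command (text : String) (prefix_ : String) : Option (String × String) :=
  let t := PySem.Str.strip text
  if !(PySem.Str.startswith t prefix_) then none
  else
    let body := PySem.Str.strip (PySem.Str.slice t (some (PySem.Str.len prefix_)) none)
    if body == "" then some ("help", "")
    else pvLoopA (PySem.List.sorted pvCommandMap.keys (fun k => PySem.Str.len k) true) body

-- ===== PORT B =====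
-- ONE_WORD_KEYS and TWO_WORD_KEYS, module-level constants of B
def pvOneWordList : List String :=
  ["home", "rest", "movej", "movel", "save", "replay", "mode", "status",
   "force", "estop", "reset", "stiffness", "speed", "impedance", "friction",
   "collision", "workspace", "singular", "telemetry", "safety", "minjerk",
   "hybrid", "forceref", "help"]
def pvTwoWordList : List (String × String) :=
  [("teach", "on"), ("teach", "off"), ("record", "start"), ("record", "stop"),
   ("dob", "on"), ("dob", "off"), ("ctc", "on"), ("ctc", "off"),
   ("calib", "gravity"), ("calib", "run"), ("calib", "kin"),
   ("calib", "kinrun"), ("dmp", "record"), ("dmp", "stop")]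
def pvOneWord : PySem.Set String := PySem.Set.ofList pvOneWordList
def pvTwoWord : PySem.Set (String × String) := PySem.Set.ofList pvTwoWordList

def parse_feishu_command_alt (text : String) (prefix_ : String) : Option (String × String) :=
  let t := PySem.Str.strip text
  if !(PySem.Str.startswith t prefix_) then none
  else
    let body := PySem.Str.strip (PySem.Str.slice t (some (PySem.Str.len prefix_)) none)
    if body == "" then some ("help", "")
    else
      let i := PySem.Str.find body " "
      if i == -1 then
        if pvOneWord.contains body then some (body, "") else none
      else
        let w1 := PySem.Str.slice body none (some i)
        let j := PySem.Str.findFrom body " " (i + 1)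
        let w2 := if j == -1 then PySem.Str.slice body (some (i + 1)) none
                  else PySem.Str.slice body (some (i + 1)) (some j)
        if pvTwoWord.contains (w1, w2) then
          let k := if j != -1 then j else PySem.Str.len body
          some (w1 ++ " " ++ w2, PySem.Str.strip (PySem.Str.slice body (some k) none))
        else if pvOneWord.contains w1 then
          some (w1, PySem.Str.strip (PySem.Str.slice body (some i) none))
        else none

-- ===== PRECONDITION & SPEC =====
def Spec_parse_feishu_command (text : String) (prefix_ : String) (out : Option (String × String)) : Prop := out = parse_feishu_command_alt text prefix_
instance (text : String) (prefix_ : String) (out : Option (String × String)) : Decidable (Spec_parse_feishu_command text prefix_ out) := by unfold Spec_parse_feishu_command; infer_instance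

-- ===== CLAIM (what is proved, stated in full; the proofs are below) =====
def Claim_equal_parse_feishu_command : Prop := ∀ (text : String) (prefix_ : String), Dom_parse_feishu_command text prefix_ → Spec_parse_feishu_command text prefix_ (parse_feishu_command text prefix_)

-- ===== LEMMAS AND PROOFS =====

-- proof-side names for B's intermediate values
def pvI (body : String) : Int := PySem.Str.find body " "
def pvJ (body : String) : Int :=
  if pvI body == -1 then -1 else PySem.Str.findFrom body " " (pvI body + 1)
def pvCand1 (body : String) : String :=
  if pvI body == -1 then body else PySem.Str.slice body none (some (pvI body))
def pvCand2 (body : String) : String :=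
  if pvJ body == -1 then body else PySem.Str.slice body none (some (pvJ body))
def pvW2 (body : String) : String :=
  if pvJ body == -1 then PySem.Str.slice body (some (pvI body + 1)) none
  else PySem.Str.slice body (some (pvI body + 1)) (some (pvJ body))

-- the value of sorted(COMMAND_MAP.keys(), key=len, reverse=True)
def pvL : List String :=
  ["calib gravity", "record start", "calib kinrun", "record stop", "dmp record",
   "teach off", "stiffness", "impedance", "collision", "calib run", "calib kin",
   "workspace", "telemetry", "teach on", "friction", "singular", "dmp stop",
   "forceref", "dob off", "ctc off", "minjerk", "replay", "status", "dob on",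
   "ctc on", "safety", "hybrid", "movej", "movel", "force", "estop", "reset",
   "speed", "home", "rest", "save", "mode", "help"]

set_option maxRecDepth 40000 in
lemma pv_sorted_keys_eq :
    PySem.List.sorted pvCommandMap.keys (fun k => PySem.Str.len k) true = pvL := by decide

set_option maxRecDepth 40000 in
lemma pv_L_pairwise : pvL.Pairwise (fun a b => b.toList.length ≤ a.toList.length) := by decide

set_option maxRecDepth 40000 in
lemma pv_L_space_count : ∀ k ∈ pvL, k.toList.count ' ' ≤ 1 := by decide

-- the membership bridges between pvL and B's two word-count tables
set_option maxRecDepth 40000 in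
lemma pv_OW_sub_L : ∀ k ∈ pvOneWordList, k ∈ pvL := by decide

set_option maxRecDepth 40000 in
lemma pv_L_nospace_OW : ∀ k ∈ pvL, k.toList.count ' ' = 0 → k ∈ pvOneWordList := by decide

set_option maxRecDepth 40000 in
lemma pv_TW_sub_L : ∀ p ∈ pvTwoWordList, (p.1 ++ " " ++ p.2) ∈ pvL := by decide

set_option maxRecDepth 40000 in
lemma pv_L_onespace_TW :
    ∀ k ∈ pvL, k.toList.count ' ' = 1 → ∃ p ∈ pvTwoWordList, k = p.1 ++ " " ++ p.2 := by decide

set_option maxRecDepth 40000 in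
lemma pv_TW_fst_nospace : ∀ p ∈ pvTwoWordList, p.1.toList.count ' ' = 0 := by decide

lemma pv_toList_inj {s t : String} (h : s.toList = t.toList) : s = t := by
  have h2 := congrArg String.ofList h
  simpa using h2

-- (k ++ [c]) is a prefix of l iff k is and the next char is c
lemma pv_append_singleton_prefix_iff (k l : List Char) (c : Char) :
    (k ++ [c]) <+: l ↔ k <+: l ∧ l[k.length]? = some c := by
  constructor
  · rintro ⟨t, ht⟩
    have hl : l = k ++ (c :: t) := by rw [← ht]; simp
    subst hl
    refine ⟨⟨c :: t, rfl⟩, ?_⟩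
    rw [List.getElem?_append_right (le_refl _)]
    simp
  · rintro ⟨⟨t, rfl⟩, hc⟩
    rw [List.getElem?_append_right (le_refl _)] at hc
    simp only [Nat.sub_self] at hc
    cases t with
    | nil => simp at hc
    | cons x t' =>
      simp only [List.getElem?_cons_zero, Option.some.injEq] at hc
      exact ⟨t', by simp [hc]⟩

lemma pv_singleton_prefix_iff (bs : List Char) (q : ℕ) (c : Char) :
    [c] <+: bs.drop q ↔ bs[q]? = some c := by
  rw [show [c] = ([] : List Char) ++ [c] from rfl, pv_append_singleton_prefix_iff]
  simp [List.getElem?_drop]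

lemma pv_prefix_getElem? {k bs : List Char} (h : k <+: bs) {idx : ℕ}
    (hidx : idx < k.length) : bs[idx]? = k[idx]? := by
  obtain ⟨t, rfl⟩ := h
  rw [List.getElem?_append_left hidx]

lemma pv_match_iff (k body : String) :
    pvMatch k body = true ↔ (k = body ∨ (k.toList ++ [' ']) <+: body.toList) := by
  simp only [pvMatch, Bool.or_eq_true, beq_iff_eq, PySem.Str.startswith_eq,
    PySem.Chars.startswith_iff, String.toList_append]
  constructor
  · rintro (h | h)
    · exact Or.inl h.symm
    · exact Or.inr (by simpa using h)
  · rintro (h | h)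
    · exact Or.inl h.symm
    · exact Or.inr (by simpa using h)

-- two distinct space positions force count ≥ 2
lemma pv_two_le_count (l : List Char) (c : Char) (p q : ℕ) (hpq : p < q)
    (hp : l[p]? = some c) (hq : l[q]? = some c) : 2 ≤ l.count c := by
  have h1 : c ∈ l.take (p+1) := by
    apply List.mem_of_getElem? (i := p)
    rw [List.getElem?_take, if_pos (by omega)]
    exact hp
  have h2 : c ∈ l.drop (p+1) := by
    apply List.mem_of_getElem? (i := q - (p+1))
    rw [List.getElem?_drop, show p + 1 + (q - (p+1)) = q by omega]
    exact hq
  have c1 : 0 < (l.take (p+1)).count c := List.count_pos_iff.mpr h1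
  have c2 : 0 < (l.drop (p+1)).count c := List.count_pos_iff.mpr h2
  calc 2 ≤ (l.take (p+1)).count c + (l.drop (p+1)).count c := by omega
    _ = l.count c := by rw [← List.count_append, List.take_append_drop]

-- first-space characterisation
lemma pv_firstSpace (body : String) (hi : pvI body ≠ -1) :
    0 ≤ pvI body ∧ body.toList[(pvI body).toNat]? = some ' ' ∧
      ∀ q < (pvI body).toNat, body.toList[q]? ≠ some ' ' := by
  have hfe : pvI body = PySem.Chars.find body.toList [' '] := by
    rw [pvI, PySem.Str.find_eq]; rfl
  rw [hfe] at hi ⊢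
  have h0 : 0 ≤ PySem.Chars.find body.toList [' '] := by
    have := PySem.Chars.neg_one_le_find body.toList [' ']
    omega
  obtain ⟨hpre, hmin⟩ := PySem.Chars.find_spec h0
  refine ⟨h0, (pv_singleton_prefix_iff _ _ _).mp hpre, ?_⟩
  intro q hq hcontra
  exact hmin q hq ((pv_singleton_prefix_iff _ _ _).mpr hcontra)

lemma pv_noSpace (body : String) (hi : pvI body = -1) : ' ' ∉ body.toList := by
  have hfe : PySem.Chars.find body.toList [' '] = -1 := by
    rw [show PySem.Chars.find body.toList [' '] = pvI body from by rw [pvI, PySem.Str.find_eq]; rfl]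
    exact hi
  have h := (PySem.Chars.find_eq_neg_one_iff body.toList [' ']).mp hfe
  intro hmem
  apply h
  obtain ⟨n, hn⟩ := List.mem_iff_getElem?.mp hmem
  exact List.infix_iff_prefix_suffix.mpr
    ⟨body.toList.drop n, (pv_singleton_prefix_iff _ _ _).mpr hn, List.drop_suffix _ _⟩

lemma pv_cand1_toList (body : String) (hi : pvI body ≠ -1) :
    (pvCand1 body).toList = body.toList.take (pvI body).toNat := by
  have h0 : 0 ≤ pvI body := (pv_firstSpace body hi).1
  have hbeq : (pvI body == -1) = false := by simp [hi]
  rw [pvCand1, hbeq]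
  simp only [Bool.false_eq_true, if_false]
  rw [PySem.Str.toList_slice, PySem.Chars.slice_eq_listSlice, PySem.List.slice_to _ h0]

lemma pv_J_eq (body : String) (hi : pvI body ≠ -1) :
    pvJ body = PySem.Chars.findFrom body.toList [' '] (((pvI body).toNat + 1 : ℕ)) := by
  have h0 : 0 ≤ pvI body := (pv_firstSpace body hi).1
  have hbeq : (pvI body == -1) = false := by simp [hi]
  rw [pvJ, hbeq]
  simp only [Bool.false_eq_true, if_false]
  rw [PySem.Str.findFrom_eq]
  have : pvI body + 1 = (((pvI body).toNat + 1 : ℕ) : ℤ) := by omega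
  rw [this]
  rfl

lemma pv_secondSpace (body : String) (hj : pvJ body ≠ -1) :
    pvI body ≠ -1 ∧ (pvI body).toNat < (pvJ body).toNat ∧
      body.toList[(pvJ body).toNat]? = some ' ' ∧
      ∀ q, (pvI body).toNat < q → q < (pvJ body).toNat → body.toList[q]? ≠ some ' ' := by
  have hi : pvI body ≠ -1 := by
    intro h
    apply hj
    simp [pvJ, h]
  obtain ⟨h0, hpsp, hpmin⟩ := pv_firstSpace body hi
  have hplen : (pvI body).toNat < body.toList.length := (List.getElem?_eq_some_iff.mp hpsp).1
  have hje := pv_J_eq body hi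
  rw [hje] at hj
  obtain ⟨hk, hpref, hmin⟩ := PySem.Chars.findFrom_natCast_spec body.toList [' ']
    ((pvI body).toNat + 1) (by omega) hj
  rw [hje]
  refine ⟨hi, by omega, (pv_singleton_prefix_iff _ _ _).mp hpref, ?_⟩
  intro q hq1 hq2 hcontra
  exact hmin q (by omega) (by omega) ((pv_singleton_prefix_iff _ _ _).mpr hcontra)

lemma pv_noSecondSpace (body : String) (hi : pvI body ≠ -1) (hj : pvJ body = -1) :
    ∀ q, (pvI body).toNat < q → body.toList[q]? ≠ some ' ' := by
  obtain ⟨h0, hpsp, hpmin⟩ := pv_firstSpace body hi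
  have hplen : (pvI body).toNat < body.toList.length := (List.getElem?_eq_some_iff.mp hpsp).1
  have hje := pv_J_eq body hi
  rw [hje] at hj
  have hno := (PySem.Chars.findFrom_natCast_eq_neg_one_iff body.toList [' ']
    ((pvI body).toNat + 1) (by omega)).mp hj
  intro q hq hcontra
  apply hno
  have hmem : ' ' ∈ body.toList.drop ((pvI body).toNat + 1) := by
    apply List.mem_of_getElem? (i := q - ((pvI body).toNat + 1))
    rw [List.getElem?_drop, show (pvI body).toNat + 1 + (q - ((pvI body).toNat + 1)) = q by omega]
    exact hcontra
  obtain ⟨n, hn⟩ := List.mem_iff_getElem?.mp hmem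
  exact List.infix_iff_prefix_suffix.mpr
    ⟨(body.toList.drop ((pvI body).toNat + 1)).drop n, (pv_singleton_prefix_iff _ _ _).mpr hn,
      List.drop_suffix _ _⟩

lemma pv_cand2_toList (body : String) (hj : pvJ body ≠ -1) :
    (pvCand2 body).toList = body.toList.take (pvJ body).toNat := by
  obtain ⟨hi, hpq, hqsp, _⟩ := pv_secondSpace body hj
  have h0 : 0 ≤ pvJ body := by omega
  have hbeq : (pvJ body == -1) = false := by simp [hj]
  rw [pvCand2, hbeq]
  simp only [Bool.false_eq_true, if_false]
  rw [PySem.Str.toList_slice, PySem.Chars.slice_eq_listSlice, PySem.List.slice_to _ h0]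

lemma pv_match_cand1 (body : String) : pvMatch (pvCand1 body) body = true := by
  by_cases hi : pvI body = -1
  · rw [pv_match_iff]
    left
    simp [pvCand1, hi]
  · rw [pv_match_iff]
    right
    rw [pv_cand1_toList body hi, pv_append_singleton_prefix_iff]
    obtain ⟨h0, hpsp, _⟩ := pv_firstSpace body hi
    have hplen : (pvI body).toNat < body.toList.length := (List.getElem?_eq_some_iff.mp hpsp).1
    refine ⟨List.take_prefix _ _, ?_⟩
    rw [List.length_take, min_eq_left (le_of_lt hplen)]
    exact hpsp

lemma pv_match_cand2 (body : String) : pvMatch (pvCand2 body) body = true := by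
  by_cases hj : pvJ body = -1
  · rw [pv_match_iff]
    left
    simp [pvCand2, hj]
  · rw [pv_match_iff]
    right
    rw [pv_cand2_toList body hj, pv_append_singleton_prefix_iff]
    obtain ⟨hi, hpq, hqsp, _⟩ := pv_secondSpace body hj
    have hqlen : (pvJ body).toNat < body.toList.length := (List.getElem?_eq_some_iff.mp hqsp).1
    refine ⟨List.take_prefix _ _, ?_⟩
    rw [List.length_take, min_eq_left (le_of_lt hqlen)]
    exact hqsp

lemma pv_cand_len (body : String) :
    pvCand1 body = pvCand2 body ∨ (pvCand1 body).toList.length < (pvCand2 body).toList.length := by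
  by_cases hj : pvJ body = -1
  · have hc2 : pvCand2 body = body := by simp [pvCand2, hj]
    by_cases hi : pvI body = -1
    · left
      simp [pvCand1, hi, hc2]
    · right
      rw [pv_cand1_toList body hi, hc2]
      obtain ⟨_, hpsp, _⟩ := pv_firstSpace body hi
      have hplen : (pvI body).toNat < body.toList.length := (List.getElem?_eq_some_iff.mp hpsp).1
      rw [List.length_take]
      omega
  · right
    obtain ⟨hi, hpq, hqsp, _⟩ := pv_secondSpace body hj
    have hqlen : (pvJ body).toNat < body.toList.length := (List.getElem?_eq_some_iff.mp hqsp).1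
    rw [pv_cand1_toList body hi, pv_cand2_toList body hj, List.length_take, List.length_take]
    omega

lemma pv_key_match (k body : String) (hk : k.toList.count ' ' ≤ 1)
    (hm : pvMatch k body = true) : k = pvCand1 body ∨ k = pvCand2 body := by
  rcases (pv_match_iff k body).mp hm with hkb | hpre
  · by_cases hj : pvJ body = -1
    · right
      rw [hkb]
      simp [pvCand2, hj]
    · exfalso
      obtain ⟨hi, hpq, hqsp, _⟩ := pv_secondSpace body hj
      obtain ⟨_, hpsp, _⟩ := pv_firstSpace body hi
      have h2 := pv_two_le_count body.toList ' ' _ _ hpq hpsp hqsp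
      rw [hkb] at hk
      omega
  · rw [pv_append_singleton_prefix_iff] at hpre
    obtain ⟨hkpre, hsp⟩ := hpre
    have hmlen : k.toList.length < body.toList.length := (List.getElem?_eq_some_iff.mp hsp).1
    have hi : pvI body ≠ -1 := by
      intro h
      exact pv_noSpace body h (List.mem_of_getElem? hsp)
    obtain ⟨h0, hpsp, hpmin⟩ := pv_firstSpace body hi
    have hpm : (pvI body).toNat ≤ k.toList.length := by
      by_contra hcon
      exact hpmin _ (by omega) hsp
    by_cases hc0 : k.toList.count ' ' = 0
    · left
      have hpe : (pvI body).toNat = k.toList.length := by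
        rcases Nat.lt_or_ge (pvI body).toNat k.toList.length with hlt | hge
        · exfalso
          have hkp : k.toList[(pvI body).toNat]? = some ' ' := by
            rw [← pv_prefix_getElem? hkpre hlt]
            exact hpsp
          exact (List.count_eq_zero.mp hc0) (List.mem_of_getElem? hkp)
        · omega
      apply pv_toList_inj
      rw [pv_cand1_toList body hi, hpe]
      exact List.prefix_iff_eq_take.mp hkpre
    · have hc1 : k.toList.count ' ' = 1 := by omega
      have hmem : ' ' ∈ k.toList := by
        rw [← List.count_pos_iff]
        omega
      obtain ⟨s, hs⟩ := List.mem_iff_getElem?.mp hmem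
      have hslen : s < k.toList.length := (List.getElem?_eq_some_iff.mp hs).1
      have hbs : body.toList[s]? = some ' ' := by
        rw [pv_prefix_getElem? hkpre hslen]
        exact hs
      have hps : (pvI body).toNat ≤ s := by
        by_contra hcon
        exact hpmin s (by omega) hbs
      have hpmlt : (pvI body).toNat < k.toList.length := by omega
      have hj : pvJ body ≠ -1 := by
        intro h
        exact pv_noSecondSpace body hi h k.toList.length (by omega) hsp
      obtain ⟨_, hpq, hqsp, hqmin⟩ := pv_secondSpace body hj
      have hqm : (pvJ body).toNat ≤ k.toList.length := by
        by_contra hcon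
        exact hqmin k.toList.length (by omega) (by omega) hsp
      have hqe : (pvJ body).toNat = k.toList.length := by
        rcases Nat.lt_or_ge (pvJ body).toNat k.toList.length with hlt | hge
        · exfalso
          have hkq : k.toList[(pvJ body).toNat]? = some ' ' := by
            rw [← pv_prefix_getElem? hkpre hlt]
            exact hqsp
          have hkp : k.toList[(pvI body).toNat]? = some ' ' := by
            rw [← pv_prefix_getElem? hkpre hpmlt]
            exact hpsp
          have := pv_two_le_count k.toList ' ' _ _ hpq hkp hkq
          omega
        · omega
      right
      apply pv_toList_inj
      rw [pv_cand2_toList body hj, hqe]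
      exact List.prefix_iff_eq_take.mp hkpre

-- the generic loop lemma: on a length-descending key list whose matches are among {c1, c2},
-- A's scan returns c2 if present, else c1, else nothing
lemma pv_loop_eq (body c1 c2 : String) (L : List String)
    (hP : L.Pairwise (fun a b => b.toList.length ≤ a.toList.length))
    (h1 : pvMatch c1 body = true) (h2 : pvMatch c2 body = true)
    (hlen : c1 = c2 ∨ c1.toList.length < c2.toList.length)
    (honly : ∀ k ∈ L, pvMatch k body = true → k = c1 ∨ k = c2) :
    pvLoopA L body =
      if c2 ∈ L then some (c2, PySem.Str.strip (PySem.Str.slice body (some (PySem.Str.len c2)) none))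
      else if c1 ∈ L then some (c1, PySem.Str.strip (PySem.Str.slice body (some (PySem.Str.len c1)) none))
      else none := by
  induction L with
  | nil => simp [pvLoopA]
  | cons k rest ih =>
    rw [List.pairwise_cons] at hP
    obtain ⟨hkrest, hrest⟩ := hP
    simp only [pvLoopA]
    by_cases hmk : pvMatch k body = true
    · rw [if_pos hmk]
      rcases honly k (List.mem_cons_self) hmk with hk1 | hk2
      · subst hk1
        rcases hlen with heq | hlt
        · rw [if_pos (heq ▸ List.mem_cons_self), ← heq]
        · have hc2 : c2 ∉ k :: rest := by
            intro hmem
            rcases List.mem_cons.mp hmem with rfl | hmem'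
            · omega
            · have := hkrest c2 hmem'
              omega
          rw [if_neg hc2, if_pos (List.mem_cons_self)]
      · subst hk2
        rw [if_pos (List.mem_cons_self)]
    · rw [if_neg hmk]
      have hne1 : c1 ≠ k := fun h => hmk (h ▸ h1)
      have hne2 : c2 ≠ k := fun h => hmk (h ▸ h2)
      rw [ih hrest (fun x hx hm => honly x (List.mem_cons_of_mem _ hx) hm)]
      simp only [List.mem_cons, hne1, hne2, false_or]

-- decomposition of cand2 as "w1 ++ ' ' ++ w2" when the body has a space
lemma pv_w2_toList (body : String) (hi : pvI body ≠ -1) :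
    (pvW2 body).toList =
      if pvJ body = -1 then body.toList.drop ((pvI body).toNat + 1)
      else (body.toList.drop ((pvI body).toNat + 1)).take ((pvJ body).toNat - ((pvI body).toNat + 1)) := by
  have h0 : 0 ≤ pvI body := (pv_firstSpace body hi).1
  by_cases hj : pvJ body = -1
  · have hbeq : (pvJ body == -1) = true := by simp [hj]
    rw [pvW2, hbeq, if_pos hj]
    simp only [if_true]
    rw [PySem.Str.toList_slice, PySem.Chars.slice_eq_listSlice, PySem.List.slice_from _ (by omega),
      show (pvI body + 1).toNat = (pvI body).toNat + 1 from by omega]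
  · obtain ⟨_, hpq, _, _⟩ := pv_secondSpace body hj
    have hbeq : (pvJ body == -1) = false := by simp [hj]
    rw [pvW2, hbeq, if_neg hj]
    simp only [Bool.false_eq_true, if_false]
    rw [PySem.Str.toList_slice, PySem.Chars.slice_eq_listSlice,
      PySem.List.slice_toNat _ (by omega) (by omega),
      show (pvI body + 1).toNat = (pvI body).toNat + 1 from by omega]

lemma pv_cand2_decomp (body : String) (hi : pvI body ≠ -1) :
    (pvCand2 body).toList = (pvCand1 body).toList ++ ' ' :: (pvW2 body).toList := by
  obtain ⟨h0, hpsp, _⟩ := pv_firstSpace body hi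
  have hplen : (pvI body).toNat < body.toList.length := (List.getElem?_eq_some_iff.mp hpsp).1
  obtain ⟨_, hget⟩ := List.getElem?_eq_some_iff.mp hpsp
  rw [pv_cand1_toList body hi, pv_w2_toList body hi]
  by_cases hj : pvJ body = -1
  · rw [if_pos hj]
    have hc2 : pvCand2 body = body := by simp [pvCand2, hj]
    rw [hc2]
    conv_lhs => rw [← List.take_append_drop (pvI body).toNat body.toList]
    congr 1
    rw [List.drop_eq_getElem_cons hplen, hget]
  · rw [if_neg hj]
    obtain ⟨_, hpq, hqsp, _⟩ := pv_secondSpace body hj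
    have hd0 : body.toList.drop (pvI body).toNat
        = ' ' :: body.toList.drop ((pvI body).toNat + 1) := by
      rw [List.drop_eq_getElem_cons hplen, hget]
    rw [pv_cand2_toList body hj]
    conv_lhs => rw [← List.take_append_drop (pvI body).toNat (body.toList.take (pvJ body).toNat)]
    rw [List.take_take, min_eq_left (by omega)]
    congr 1
    rw [List.drop_take, hd0]
    have hq : (pvJ body).toNat - (pvI body).toNat
        = ((pvJ body).toNat - ((pvI body).toNat + 1)) + 1 := by omega
    rw [hq, List.take_succ_cons]

lemma pv_cand1_nospace (body : String) : ' ' ∉ (pvCand1 body).toList := by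
  by_cases hi : pvI body = -1
  · have : pvCand1 body = body := by simp [pvCand1, hi]
    rw [this]
    exact pv_noSpace body hi
  · rw [pv_cand1_toList body hi]
    obtain ⟨_, _, hpmin⟩ := pv_firstSpace body hi
    intro hmem
    obtain ⟨m, hm⟩ := List.mem_iff_getElem?.mp hmem
    have hmlt : m < (pvI body).toNat := by
      have := (List.getElem?_eq_some_iff.mp hm).1
      rw [List.length_take] at this
      omega
    rw [List.getElem?_take, if_pos hmlt] at hm
    exact hpmin m hmlt hm

lemma pv_w2_nospace (body : String) (hi : pvI body ≠ -1) : ' ' ∉ (pvW2 body).toList := by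
  rw [pv_w2_toList body hi]
  by_cases hj : pvJ body = -1
  · rw [if_pos hj]
    intro hmem
    obtain ⟨m, hm⟩ := List.mem_iff_getElem?.mp hmem
    rw [List.getElem?_drop] at hm
    exact pv_noSecondSpace body hi hj _ (by omega) hm
  · rw [if_neg hj]
    obtain ⟨_, hpq, _, hqmin⟩ := pv_secondSpace body hj
    intro hmem
    obtain ⟨m, hm⟩ := List.mem_iff_getElem?.mp hmem
    have hmlt : m < (pvJ body).toNat - ((pvI body).toNat + 1) := by
      have := (List.getElem?_eq_some_iff.mp hm).1
      rw [List.length_take] at this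
      omega
    rw [List.getElem?_take, if_pos hmlt, List.getElem?_drop] at hm
    exact hqmin _ (by omega) (by omega) hm

lemma pv_cand2_str (body : String) (hi : pvI body ≠ -1) :
    pvCand2 body = pvCand1 body ++ " " ++ pvW2 body := by
  apply pv_toList_inj
  rw [pv_cand2_decomp body hi]
  simp

-- unique split of "u1 ++ ' ' ++ u2" with space-free first components
lemma pv_split_unique (u1 u2 w1 w2 : List Char) (hu : ' ' ∉ u1) (hw : ' ' ∉ w1)
    (h : u1 ++ ' ' :: u2 = w1 ++ ' ' :: w2) : u1 = w1 ∧ u2 = w2 := by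
  have hlen : u1.length = w1.length := by
    rcases Nat.lt_trichotomy u1.length w1.length with hlt | heq | hgt
    · exfalso
      have h1 : (u1 ++ ' ' :: u2)[u1.length]? = some ' ' := by
        rw [List.getElem?_append_right (le_refl _)]
        simp
      rw [h, List.getElem?_append_left hlt] at h1
      exact hw (List.mem_of_getElem? h1)
    · exact heq
    · exfalso
      have h1 : (w1 ++ ' ' :: w2)[w1.length]? = some ' ' := by
        rw [List.getElem?_append_right (le_refl _)]
        simp
      rw [← h, List.getElem?_append_left hgt] at h1
      exact hu (List.mem_of_getElem? h1)
  obtain ⟨ha, hb⟩ := List.append_inj h hlen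
  exact ⟨ha, by injection hb⟩

-- membership equivalences between pvL and B's tables
lemma pv_mem_L_iff_OW (s : String) (hns : ' ' ∉ s.toList) :
    s ∈ pvL ↔ s ∈ pvOneWordList := by
  constructor
  · intro h
    exact pv_L_nospace_OW s h (List.count_eq_zero.mpr hns)
  · intro h
    exact pv_OW_sub_L s h

lemma pv_cand2_mem_L_iff_TW (body : String) (hi : pvI body ≠ -1) :
    pvCand2 body ∈ pvL ↔ (pvCand1 body, pvW2 body) ∈ pvTwoWordList := by
  constructor
  · intro h
    have hcnt : (pvCand2 body).toList.count ' ' = 1 := by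
      rw [pv_cand2_decomp body hi]
      rw [List.count_append, List.count_cons]
      rw [List.count_eq_zero.mpr (pv_cand1_nospace body),
        List.count_eq_zero.mpr (pv_w2_nospace body hi)]
      simp
    obtain ⟨p, hp, hpe⟩ := pv_L_onespace_TW (pvCand2 body) h hcnt
    have hlist : (pvCand1 body).toList ++ ' ' :: (pvW2 body).toList
        = p.1.toList ++ ' ' :: p.2.toList := by
      rw [← pv_cand2_decomp body hi]
      rw [hpe]
      simp
    have hp1ns : ' ' ∉ p.1.toList := List.count_eq_zero.mp (pv_TW_fst_nospace p hp)
    obtain ⟨ha, hb⟩ := pv_split_unique _ _ _ _ (pv_cand1_nospace body) hp1ns hlist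
    have : (pvCand1 body, pvW2 body) = p := by
      cases p with
      | mk p1 p2 =>
        simp only [Prod.mk.injEq]
        exact ⟨pv_toList_inj ha, pv_toList_inj hb⟩
    rw [this]
    exact hp
  · intro h
    have := pv_TW_sub_L (pvCand1 body, pvW2 body) h
    rw [← pv_cand2_str body hi] at this
    exact this

-- lengths of the candidates as Int = the slice bounds B uses
lemma pv_len_cand1 (body : String) (hi : pvI body ≠ -1) :
    (PySem.Str.len (pvCand1 body) : Int) = pvI body := by
  obtain ⟨h0, hpsp, _⟩ := pv_firstSpace body hi
  have hplen : (pvI body).toNat < body.toList.length := (List.getElem?_eq_some_iff.mp hpsp).1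
  rw [PySem.Str.len_eq, pv_cand1_toList body hi, List.length_take]
  omega

lemma pv_len_cand2 (body : String) :
    (PySem.Str.len (pvCand2 body) : Int) =
      if pvJ body ≠ -1 then pvJ body else PySem.Str.len body := by
  by_cases hj : pvJ body = -1
  · rw [if_neg (by simp [hj])]
    simp [pvCand2, hj]
  · rw [if_pos hj]
    obtain ⟨_, hpq, hqsp, _⟩ := pv_secondSpace body hj
    have hqlen : (pvJ body).toNat < body.toList.length := (List.getElem?_eq_some_iff.mp hqsp).1
    rw [PySem.Str.len_eq, pv_cand2_toList body hj, List.length_take]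
    omega

lemma pv_strip_empty_slice (body : String) :
    PySem.Str.strip (PySem.Str.slice body (some (PySem.Str.len body)) none) = "" := by
  apply pv_toList_inj
  rw [PySem.Str.toList_strip, PySem.Str.toList_slice, PySem.Chars.slice_eq_listSlice,
    PySem.List.slice_from _ (by rw [PySem.Str.len_eq]; omega)]
  have h : (PySem.Str.len body).toNat = body.toList.length := by rw [PySem.Str.len_eq]; omega
  rw [h, List.drop_length]
  simp [PySem.Chars.strip, PySem.Chars.lstrip, PySem.Chars.rstrip]

lemma pv_set_contains_OW (s : String) : pvOneWord.contains s = decide (s ∈ pvOneWordList) := by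
  rcases h : decide (s ∈ pvOneWordList) with _ | _
  · simp only [decide_eq_false_iff_not] at h
    rcases hc : pvOneWord.contains s with _ | _
    · rfl
    · exact absurd ((PySem.Set.contains_iff _ _).mp hc)
        (by rw [pvOneWord, PySem.Set.mem_ofList]; exact h)
  · simp only [decide_eq_true_eq] at h
    exact (PySem.Set.contains_iff _ _).mpr (by rw [pvOneWord, PySem.Set.mem_ofList]; exact h)

lemma pv_set_contains_TW (p : String × String) :
    pvTwoWord.contains p = decide (p ∈ pvTwoWordList) := by
  rcases h : decide (p ∈ pvTwoWordList) with _ | _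
  · simp only [decide_eq_false_iff_not] at h
    rcases hc : pvTwoWord.contains p with _ | _
    · rfl
    · exact absurd ((PySem.Set.contains_iff _ _).mp hc)
        (by rw [pvTwoWord, PySem.Set.mem_ofList]; exact h)
  · simp only [decide_eq_true_eq] at h
    exact (PySem.Set.contains_iff _ _).mpr (by rw [pvTwoWord, PySem.Set.mem_ofList]; exact h)

-- the central equality: A's key scan = B's two membership tests
lemma pv_main (body : String) :
    pvLoopA (PySem.List.sorted pvCommandMap.keys (fun k => PySem.Str.len k) true) body =
      (let i := PySem.Str.find body " "
       if i == -1 then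
         if pvOneWord.contains body then some (body, "") else none
       else
         let w1 := PySem.Str.slice body none (some i)
         let j := PySem.Str.findFrom body " " (i + 1)
         let w2 := if j == -1 then PySem.Str.slice body (some (i + 1)) none
                   else PySem.Str.slice body (some (i + 1)) (some j)
         if pvTwoWord.contains (w1, w2) then
           let k := if j != -1 then j else PySem.Str.len body
           some (w1 ++ " " ++ w2, PySem.Str.strip (PySem.Str.slice body (some k) none))
         else if pvOneWord.contains w1 then
           some (w1, PySem.Str.strip (PySem.Str.slice body (some i) none))
         else none) := by
  rw [pv_sorted_keys_eq]
  rw [pv_loop_eq body (pvCand1 body) (pvCand2 body) pvL pv_L_pairwise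
    (pv_match_cand1 body) (pv_match_cand2 body) (pv_cand_len body)
    (fun k hk hm => pv_key_match k body (pv_L_space_count k hk) hm)]
  have hIr : PySem.Str.find body " " = pvI body := rfl
  simp only [hIr]
  by_cases hi : pvI body = -1
  · have hc1 : pvCand1 body = body := by simp [pvCand1, hi]
    have hc2 : pvCand2 body = body := by simp [pvCand2, hi, pvJ]
    simp only [hi, show ((-1 : Int) == -1) = true from rfl, if_true]
    rw [hc1, hc2, pv_set_contains_OW]
    by_cases hm : body ∈ pvL
    · rw [if_pos hm]
      have hmo : body ∈ pvOneWordList := (pv_mem_L_iff_OW body (pv_noSpace body hi)).mp hm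
      rw [if_pos (show (decide (body ∈ pvOneWordList)) = true from by simpa using hmo)]
      rw [pv_strip_empty_slice]
    · rw [if_neg hm, if_neg hm]
      have hmo : body ∉ pvOneWordList := fun h => hm ((pv_mem_L_iff_OW body (pv_noSpace body hi)).mpr h)
      rw [if_neg (show ¬((decide (body ∈ pvOneWordList)) = true) from by simpa using hmo)]
  · rw [if_neg (show ¬((pvI body == -1) = true) from by simp [hi])]
    have hJr : PySem.Str.findFrom body " " (pvI body + 1) = pvJ body := by
      rw [pvJ, if_neg (by simpa using hi)]
    simp only [hJr]
    have hW1 : PySem.Str.slice body none (some (pvI body)) = pvCand1 body := by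
      rw [pvCand1, if_neg (by simpa using hi)]
    simp only [hW1]
    have hW2 : (if pvJ body == -1 then PySem.Str.slice body (some (pvI body + 1)) none
        else PySem.Str.slice body (some (pvI body + 1)) (some (pvJ body))) = pvW2 body := by
      rw [pvW2]
    simp only [hW2]
    rw [pv_set_contains_TW (pvCand1 body, pvW2 body), pv_set_contains_OW (pvCand1 body)]
    by_cases hTW : (pvCand1 body, pvW2 body) ∈ pvTwoWordList
    · have hm2 : pvCand2 body ∈ pvL := (pv_cand2_mem_L_iff_TW body hi).mpr hTW
      rw [if_pos hm2,
        if_pos (show (decide ((pvCand1 body, pvW2 body) ∈ pvTwoWordList)) = true from by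
          simpa using hTW)]
      have hk : (if (pvJ body != -1) = true then pvJ body else PySem.Str.len body)
          = (PySem.Str.len (pvCand2 body) : Int) := by
        rw [pv_len_cand2]
        by_cases hj : pvJ body = -1 <;> simp [hj]
      rw [hk, ← pv_cand2_str body hi]
    · have hm2 : pvCand2 body ∉ pvL := fun h => hTW ((pv_cand2_mem_L_iff_TW body hi).mp h)
      rw [if_neg hm2,
        if_neg (show ¬((decide ((pvCand1 body, pvW2 body) ∈ pvTwoWordList)) = true) from by
          simpa using hTW)]
      by_cases hOW : pvCand1 body ∈ pvOneWordList
      · have hm1 : pvCand1 body ∈ pvL :=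
          (pv_mem_L_iff_OW (pvCand1 body) (pv_cand1_nospace body)).mpr hOW
        rw [if_pos hm1,
          if_pos (show (decide (pvCand1 body ∈ pvOneWordList)) = true from by simpa using hOW)]
        rw [show (some (PySem.Str.len (pvCand1 body)) : Option Int)
            = some (pvI body) from by rw [pv_len_cand1 body hi]]
      · have hm1 : pvCand1 body ∉ pvL :=
          fun h => hOW ((pv_mem_L_iff_OW (pvCand1 body) (pv_cand1_nospace body)).mp h)
        rw [if_neg hm1,
          if_neg (show ¬((decide (pvCand1 body ∈ pvOneWordList)) = true) from by simpa using hOW)]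

-- ===== VERDICT (by name: the statement is the Claim_ definition above) =====
set_option maxRecDepth 100000 in
theorem parse_feishu_command_spec : Claim_equal_parse_feishu_command := by
  intro text prefix_ _
  show parse_feishu_command text prefix_ = parse_feishu_command_alt text prefix_
  unfold parse_feishu_command parse_feishu_command_alt
  cases hs : PySem.Str.startswith (PySem.Str.strip text) prefix_ with
  | false => simp only [hs, Bool.not_false, reduceIte]
  | true =>
    simp only [hs, Bool.not_true, Bool.false_eq_true, if_false]

    by_cases hb : PySem.Str.strip (PySem.Str.slice (PySem.Str.strip text)
        (some (PySem.Str.len prefix_)) none) = ""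
    · rw [if_pos (show (PySem.Str.strip (PySem.Str.slice (PySem.Str.strip text)
          (some (PySem.Str.len prefix_)) none) == "") = true from by simpa using hb),
        if_pos (show (PySem.Str.strip (PySem.Str.slice (PySem.Str.strip text)
          (some (PySem.Str.len prefix_)) none) == "") = true from by simpa using hb)]
    · rw [if_neg (show ¬((PySem.Str.strip (PySem.Str.slice (PySem.Str.strip text)
          (some (PySem.Str.len prefix_)) none) == "") = true) from by simpa using hb),
        if_neg (show ¬((PySem.Str.strip (PySem.Str.slice (PySem.Str.strip text)
          (some (PySem.Str.len prefix_)) none) == "") = true) from by simpa using hb)]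
      exact pv_main _
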